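-- pv_equiv track=rewrite | github.com/Rivarrl/leetcode_python | dp.py | min_of_multiply
-- ===== SOURCE A (Python) =====
-- def min_of_multiply(series):
--     """
--     POJ1651
--     给定N个数，每次从中抽出一个数(第一和最后一个不能抽)，该次的得分即为抽出的数与相邻两个数的乘积。
--     一直这样将每次的得分累加直到只剩下首尾两个数为止，问最小得分。
--     思路：i到j长度的最小值= (i-k长度最小值) + (k-j长度最小值) + (最后一次得分(x[i] * x[j] * x[k]))
--     :param series: List[int] 数组
--     :return: int 最小得分
--     """
--     l = series.__len__()
--     if l < 3:
--         return -1
--     if l == 3: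
--         return series[0] * series[1] * series[2]
--     dp = [[0 for _ in range(l)] for _ in range(l)]
--     for i in range(l - 2):
--         dp[i][i + 2] = series[i] * series[i + 1] * series[i + 2]
--
--     for w in range(3, l):
--         for i in range(l - w):
--             j = i + w
--             for k in range(i + 1, j):
--                 if dp[i][j] == 0:
--                     dp[i][j] = dp[i][k] + dp[k][j] + series[i] * series[k] * series[j]
--                 else:
--                     dp[i][j] = min(dp[i][j], dp[i][k] + dp[k][j] + series[i] * series[k] * series[j])
--     return dp[0][l - 1]
-- ===== SOURCE B (Python) =====
-- def min_of_multiply(series):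
--     l = len(series)
--     if l < 3:
--         return -1
--     memo = {}
--     def best(i, j):
--         if j <= i + 1:
--             return 0
--         if j == i + 2:
--             return series[i] * series[i + 1] * series[j]
--         if (i, j) in memo:
--             return memo[(i, j)]
--         acc = 0
--         for k in range(i + 1, j):
--             cand = best(i, k) + best(k, j) + series[i] * series[k] * series[j]
--             acc = cand if acc == 0 else min(acc, cand)
--         memo[(i, j)] = acc
--         return acc
--     return best(0, l - 1)
-- ===== Notes on version B (the rewrite author's own statement) =====
-- stated objective: alternative
-- what changed: Replaces the bottom-up width-major triple loop over an l x l table with a top-down recursive decomposition of the interval memoized in a dict keyed by (i, j), computing only the intervals the answer depends on with the same update rule.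
import Mathlib
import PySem

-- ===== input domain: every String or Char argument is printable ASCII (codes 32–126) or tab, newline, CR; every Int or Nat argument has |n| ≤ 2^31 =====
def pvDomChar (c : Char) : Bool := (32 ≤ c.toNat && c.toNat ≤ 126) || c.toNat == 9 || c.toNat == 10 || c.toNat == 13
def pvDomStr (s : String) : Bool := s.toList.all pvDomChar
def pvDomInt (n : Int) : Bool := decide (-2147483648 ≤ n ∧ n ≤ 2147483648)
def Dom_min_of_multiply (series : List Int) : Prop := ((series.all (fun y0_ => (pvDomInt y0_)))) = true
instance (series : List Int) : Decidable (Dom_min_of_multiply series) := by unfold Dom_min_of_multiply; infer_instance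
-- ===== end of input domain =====

-- B re-implements the same interval DP as a top-down memoized recursion (same update rule,
-- different decomposition: recursive with a dict memo instead of a bottom-up l×l table); same cost.

-- ===== PORT A =====
-- series[i] (indices are always in range where A uses them)
def pvGet (s : List Int) (i : Int) : Int := PySem.List.pyGetD s i 0
-- dp[i][j]
def pvGet2 (dp : List (List Int)) (i j : Int) : Int :=
  PySem.List.pyGetD (PySem.List.pyGetD dp i []) j 0
-- dp[i][j] = v
def pvSet2 (dp : List (List Int)) (i j : Int) (v : Int) : List (List Int) :=
  PySem.List.pySetD dp i (PySem.List.pySetD (PySem.List.pyGetD dp i []) j v)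

def min_of_multiply (series : List Int) : Int :=
  let l : Int := PySem.List.len series
  if l < 3 then -1
  else if l = 3 then pvGet series 0 * pvGet series 1 * pvGet series 2
  else
    let dp : List (List Int) :=
      (PySem.List.pyRange 0 l 1).map (fun _ => (PySem.List.pyRange 0 l 1).map (fun _ => (0 : Int)))
    let dp := (PySem.List.pyRange 0 (l - 2) 1).foldl
      (fun dp i => pvSet2 dp i (i + 2) (pvGet series i * pvGet series (i + 1) * pvGet series (i + 2))) dp
    let dp := (PySem.List.pyRange 3 l 1).foldl (fun dp w =>
      (PySem.List.pyRange 0 (l - w) 1).foldl (fun dp i =>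
        let j := i + w
        (PySem.List.pyRange (i + 1) j 1).foldl (fun dp k =>
          if pvGet2 dp i j = 0 then
            pvSet2 dp i j (pvGet2 dp i k + pvGet2 dp k j + pvGet series i * pvGet series k * pvGet series j)
          else
            pvSet2 dp i j (min (pvGet2 dp i j) (pvGet2 dp i k + pvGet2 dp k j + pvGet series i * pvGet series k * pvGet series j))) dp) dp) dp
    pvGet2 dp 0 (l - 1)

-- ===== PORT B =====
-- best(i, j) of Source B: recursion on the interval, memo dict threaded through; the inner
-- `for k in range(i+1, j)` is a fold over (acc, memo); fuel only makes the recursion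
-- structural (any fuel ≥ the interval width gives Source B's value)
def pvBest (s : List Int) (fuel : Nat) (memo : PySem.Dict (Int × Int) Int) (i j : Int) :
    Int × PySem.Dict (Int × Int) Int :=
  match fuel with
  | 0 => (0, memo)
  | fuel + 1 =>
    if j ≤ i + 1 then (0, memo)
    else if j = i + 2 then (pvGet s i * pvGet s (i + 1) * pvGet s j, memo)
    else
      match memo.get? (i, j) with
      | some v => (v, memo)
      | none =>
        let r := (PySem.List.pyRange (i + 1) j 1).foldl
          (fun (p : Int × PySem.Dict (Int × Int) Int) k =>
            let r1 := pvBest s fuel p.2 i k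
            let r2 := pvBest s fuel r1.2 k j
            let cand := r1.1 + r2.1 + pvGet s i * pvGet s k * pvGet s j
            (if p.1 = 0 then cand else min p.1 cand, r2.2)) (0, memo)
        (r.1, r.2.insert (i, j) r.1)

def min_of_multiply_alt (series : List Int) : Int :=
  let l : Int := PySem.List.len series
  if l < 3 then -1
  else (pvBest series series.length PySem.Dict.empty 0 (l - 1)).1

-- ===== PRECONDITION & SPEC =====
def Spec_min_of_multiply (series : List Int) (out : Int) : Prop := out = min_of_multiply_alt series
instance (series : List Int) (out : Int) : Decidable (Spec_min_of_multiply series out) := by unfold Spec_min_of_multiply; infer_instance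

-- ===== CLAIM (what is proved, stated in full; the proofs are below) =====
def Claim_equal_min_of_multiply : Prop := ∀ (series : List Int), Dom_min_of_multiply series → Spec_min_of_multiply series (min_of_multiply series)

-- ===== LEMMAS AND PROOFS =====

mutual
def pvF (s : List Int) (i j : Int) : Int :=
  if j ≤ i + 1 then 0
  else if j = i + 2 then pvGet s i * pvGet s (i + 1) * pvGet s j
  else pvFLoop s i j (i + 1) 0
termination_by ((j - i).toNat, 1, 0)
def pvFLoop (s : List Int) (i j k acc : Int) : Int :=
  if i < k ∧ k < j then
    pvFLoop s i j (k + 1)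
      (if acc = 0 then pvF s i k + pvF s k j + pvGet s i * pvGet s k * pvGet s j
       else min acc (pvF s i k + pvF s k j + pvGet s i * pvGet s k * pvGet s j))
  else acc
termination_by ((j - i).toNat, 0, (j - k).toNat)
end

def pvInv (s : List Int) (memo : PySem.Dict (Int × Int) Int) : Prop :=
  ∀ i j v, memo.get? (i, j) = some v → v = pvF s i j

theorem pvInv_empty (s : List Int) : pvInv s PySem.Dict.empty := by
  intro i j v hv
  simp [PySem.Dict.get?_empty] at hv

-- one step of the k-loop, with all dp reads already replaced by their values
def pvStep (s : List Int) (i j : Int) (acc k : Int) : Int :=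
  if acc = 0 then pvF s i k + pvF s k j + pvGet s i * pvGet s k * pvGet s j
  else min acc (pvF s i k + pvF s k j + pvGet s i * pvGet s k * pvGet s j)

theorem pvFLoop_eq_foldl (s : List Int) (i j : Int) :
    ∀ (n : Nat) (k acc : Int), i < k → (j - k).toNat = n →
      pvFLoop s i j k acc = (PySem.List.pyRange k j 1).foldl (pvStep s i j) acc := by
  intro n
  induction n with
  | zero =>
    intro k acc hik hn
    have hkj : j ≤ k := by omega
    rw [pvFLoop, if_neg (by omega), PySem.List.pyRange_one_eq_nil hkj]
    rfl
  | succ m ih =>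
    intro k acc hik hn
    have hkj : k < j := by omega
    rw [pvFLoop, if_pos ⟨hik, hkj⟩, PySem.List.pyRange_one_cons hkj]
    rw [List.foldl_cons]
    exact ih (k + 1) _ (by omega) (by omega)

theorem pvF_eq_foldl (s : List Int) (i j : Int) (h : i + 3 ≤ j) :
    pvF s i j = (PySem.List.pyRange (i + 1) j 1).foldl (pvStep s i j) 0 := by
  rw [pvF, if_neg (by omega), if_neg (by omega)]
  exact pvFLoop_eq_foldl s i j _ (i + 1) 0 (by omega) rfl

-- generic loop-invariant rule for a fold over range(a, b)
theorem pvFoldInv {β : Type} (f : β → Int → β) (P : Int → β → Prop) :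
    ∀ (n : Nat) (a b : Int), a ≤ b → (b - a).toNat = n →
      (∀ x t, a ≤ x → x < b → P x t → P (x + 1) (f t x)) →
      ∀ t, P a t → P b ((PySem.List.pyRange a b 1).foldl f t) := by
  intro n
  induction n with
  | zero =>
    intro a b hab hn _ t ht
    have : a = b := by omega
    subst this
    rw [PySem.List.pyRange_one_eq_nil le_rfl]
    exact ht
  | succ m ih =>
    intro a b hab hn hstep t ht
    have hab' : a < b := by omega
    rw [PySem.List.pyRange_one_cons hab', List.foldl_cons]
    exact ih (a + 1) b (by omega) (by omega)
      (fun x t hx hx' => hstep x t (by omega) hx') _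
      (hstep a t le_rfl hab' ht)

theorem pvBest_eq (s : List Int) (fuel : Nat) :
    ∀ (i j : Int) (memo : PySem.Dict (Int × Int) Int), (j - i).toNat ≤ fuel → pvInv s memo →
      (pvBest s fuel memo i j).1 = pvF s i j ∧ pvInv s (pvBest s fuel memo i j).2 := by
  induction fuel with
  | zero =>
    intro i j memo hw hInv
    rw [pvBest, pvF, if_pos (by omega)]
    exact ⟨rfl, hInv⟩
  | succ f ih =>
    intro i j memo hw hInv
    rw [pvBest]
    by_cases h1 : j ≤ i + 1
    · rw [if_pos h1, pvF, if_pos h1]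
      exact ⟨rfl, hInv⟩
    · rw [if_neg h1]
      by_cases h2 : j = i + 2
      · rw [if_pos h2, pvF, if_neg h1, if_pos h2]
        exact ⟨rfl, hInv⟩
      · rw [if_neg h2]
        rcases hm : memo.get? (i, j) with _ | v
        · simp only
          have hP : (fun x (p : Int × PySem.Dict (Int × Int) Int) =>
                p.1 = (PySem.List.pyRange (i + 1) x 1).foldl (pvStep s i j) 0 ∧ pvInv s p.2) j
              ((PySem.List.pyRange (i + 1) j 1).foldl
                (fun (p : Int × PySem.Dict (Int × Int) Int) k =>
                  let r1 := pvBest s f p.2 i k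
                  let r2 := pvBest s f r1.2 k j
                  let cand := r1.1 + r2.1 + pvGet s i * pvGet s k * pvGet s j
                  (if p.1 = 0 then cand else min p.1 cand, r2.2)) (0, memo)) := by
            apply pvFoldInv
              (fun (p : Int × PySem.Dict (Int × Int) Int) k =>
                let r1 := pvBest s f p.2 i k
                let r2 := pvBest s f r1.2 k j
                let cand := r1.1 + r2.1 + pvGet s i * pvGet s k * pvGet s j
                (if p.1 = 0 then cand else min p.1 cand, r2.2))
              (fun x (p : Int × PySem.Dict (Int × Int) Int) =>
                p.1 = (PySem.List.pyRange (i + 1) x 1).foldl (pvStep s i j) 0 ∧ pvInv s p.2)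
              (j - (i + 1)).toNat (i + 1) j (by omega) rfl
            · intro x p hx hx2 hp
              obtain ⟨hacc, hI⟩ := hp
              obtain ⟨e1, hI1⟩ := ih i x p.2 (by omega) hI
              obtain ⟨e2, hI2⟩ := ih x j (pvBest s f p.2 i x).2 (by omega) hI1
              refine ⟨?_, hI2⟩
              show (if p.1 = 0 then _ else min p.1 _) = _
              rw [e1, e2, hacc, PySem.List.pyRange_one_succ_right (by omega), List.foldl_append,
                  List.foldl_cons, List.foldl_nil]
              rfl
            · exact ⟨by rw [PySem.List.pyRange_one_eq_nil (by omega), List.foldl_nil], hInv⟩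
          obtain ⟨hval, hI⟩ := hP
          rw [pvF, if_neg h1, if_neg h2,
              pvFLoop_eq_foldl s i j (j - (i + 1)).toNat (i + 1) 0 (by omega) rfl]
          refine ⟨hval, ?_⟩
          intro a b v hget
          rw [PySem.Dict.get?_insert] at hget
          by_cases hab : ((a : Int), (b : Int)) = (i, j)
          · rw [Prod.mk.injEq] at hab
            obtain ⟨rfl, rfl⟩ := hab
            simp at hget
            subst hget
            rw [hval, pvF, if_neg h1, if_neg h2,
                pvFLoop_eq_foldl s a b (b - (a + 1)).toNat (a + 1) 0 (by omega) rfl]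
          · rw [if_neg hab] at hget
            exact hI a b v hget
        · simp only
          refine ⟨?_, hInv⟩
          rw [hInv i j v hm]

def pvShape (dp : List (List Int)) (n : Nat) : Prop :=
  dp.length = n ∧ ∀ r ∈ dp, r.length = n

theorem pvGetD_set {α : Type} (l : List α) (i j : Nat) (v : α) (d : α) (hi : i < l.length) :
    (l.set i v).getD j d = if i = j then v else l.getD j d := by
  rw [List.getD_eq_getElem?_getD, List.getElem?_set, List.getD_eq_getElem?_getD]
  split_ifs <;> simp_all

theorem pvShape_set2 {dp : List (List Int)} {n : Nat} (h : pvShape dp n)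
    (i j : Int) (v : Int) (hi : 0 ≤ i) (hi2 : i < (n : Int)) :
    pvShape (pvSet2 dp i j v) n := by
  obtain ⟨hlen, hrow⟩ := h
  unfold pvSet2
  rw [PySem.List.pySetD_of_nonneg _ _ hi]
  refine ⟨by simpa using hlen, ?_⟩
  intro r hr
  rcases List.mem_or_eq_of_mem_set hr with hr' | rfl
  · exact hrow r hr'
  · rw [PySem.List.length_pySetD]
    rw [PySem.List.pyGetD_eq_getElem _ _ hi (by rw [hlen]; exact_mod_cast hi2)]
    exact hrow _ (List.getElem_mem (by rw [hlen]; omega))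

theorem pvGet2_set2 {dp : List (List Int)} {n : Nat} (h : pvShape dp n)
    (i j a b : Int) (v : Int) (hi : 0 ≤ i) (hi2 : i < (n : Int)) (hj : 0 ≤ j) (hj2 : j < (n : Int))
    (ha : 0 ≤ a) (hb : 0 ≤ b) :
    pvGet2 (pvSet2 dp i j v) a b = if a = i ∧ b = j then v else pvGet2 dp a b := by
  obtain ⟨hlen, hrow⟩ := h
  have hiN : i.toNat < dp.length := by rw [hlen]; omega
  unfold pvGet2 pvSet2
  rw [PySem.List.pySetD_of_nonneg _ _ hi, PySem.List.pySetD_of_nonneg _ _ hj,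
      PySem.List.pyGetD_of_nonneg _ _ ha, PySem.List.pyGetD_of_nonneg _ _ ha,
      PySem.List.pyGetD_of_nonneg _ _ hi, PySem.List.pyGetD_of_nonneg _ _ hb,
      PySem.List.pyGetD_of_nonneg _ _ hb]
  rw [pvGetD_set _ _ _ _ _ hiN]
  by_cases hai : i.toNat = a.toNat
  · rw [if_pos hai]
    have hrl : (dp.getD i.toNat []).length = n := by
      rw [List.getD_eq_getElem?_getD, List.getElem?_eq_getElem hiN]
      exact hrow _ (List.getElem_mem hiN)
    rw [pvGetD_set _ _ _ _ _ (by rw [hrl]; omega)]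
    have hai' : a = i := by omega
    by_cases hbj : j.toNat = b.toNat
    · rw [if_pos hbj, if_pos ⟨hai', by omega⟩]
    · rw [if_neg hbj, if_neg (by omega), hai']
  · rw [if_neg hai, if_neg (by omega)]

theorem pvGet2_zeros (l : Int) (a b : Int) (ha : 0 ≤ a) (hb : 0 ≤ b) :
    pvGet2 ((PySem.List.pyRange 0 l 1).map
      (fun _ => (PySem.List.pyRange 0 l 1).map (fun _ => (0 : Int)))) a b = 0 := by
  unfold pvGet2
  rw [PySem.List.pyGetD_of_nonneg _ _ ha, PySem.List.pyGetD_of_nonneg _ _ hb]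
  rw [List.getD_eq_getElem?_getD, List.getD_eq_getElem?_getD]
  rcases h : ((PySem.List.pyRange 0 l 1).map
      (fun _ => (PySem.List.pyRange 0 l 1).map (fun _ => (0 : Int))))[a.toNat]? with _ | r
  · simp
  · have hr : r ∈ _ := List.mem_of_getElem? h
    obtain ⟨x, _, rfl⟩ := List.mem_map.1 hr
    simp only [Option.getD_some]
    rcases h2 : ((PySem.List.pyRange 0 l 1).map (fun _ => (0 : Int)))[b.toNat]? with _ | y
    · simp
    · have hy : y ∈ _ := List.mem_of_getElem? h2
      obtain ⟨_, _, rfl⟩ := List.mem_map.1 hy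
      simp

theorem pvShape_zeros (l : Int) :
    pvShape ((PySem.List.pyRange 0 l 1).map
      (fun _ => (PySem.List.pyRange 0 l 1).map (fun _ => (0 : Int)))) l.toNat := by
  constructor
  · simp [PySem.List.length_pyRange_one]
  · intro r hr
    obtain ⟨x, _, rfl⟩ := List.mem_map.1 hr
    simp [PySem.List.length_pyRange_one]

def pvBaseInv (s : List Int) (l x : Int) (dp : List (List Int)) : Prop :=
  pvShape dp l.toNat ∧ ∀ a b : Int, 0 ≤ a → a < l → 0 ≤ b → b < l →
    pvGet2 dp a b = if b = a + 2 ∧ a < x then pvF s a b else 0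

def pvWInv (s : List Int) (l w : Int) (dp : List (List Int)) : Prop :=
  pvShape dp l.toNat ∧ ∀ a b : Int, 0 ≤ a → a < l → 0 ≤ b → b < l →
    pvGet2 dp a b = if 2 ≤ b - a ∧ b - a < w then pvF s a b else 0

def pvIInv (s : List Int) (l w i : Int) (dp : List (List Int)) : Prop :=
  pvShape dp l.toNat ∧ ∀ a b : Int, 0 ≤ a → a < l → 0 ≤ b → b < l →
    pvGet2 dp a b = if 2 ≤ b - a ∧ (b - a < w ∨ (b - a = w ∧ a < i)) then pvF s a b else 0

theorem pvBase_step (s : List Int) (l x : Int) (dp : List (List Int))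
    (hx : 0 ≤ x) (hx2 : x < l - 2) (h : pvBaseInv s l x dp) :
    pvBaseInv s l (x + 1)
      (pvSet2 dp x (x + 2) (pvGet s x * pvGet s (x + 1) * pvGet s (x + 2))) := by
  obtain ⟨hsh, hval⟩ := h
  have hcast : ((l.toNat : Int)) = l := by omega
  refine ⟨pvShape_set2 hsh _ _ _ hx (by omega), ?_⟩
  intro a b ha ha2 hb hb2
  rw [pvGet2_set2 hsh _ _ _ _ _ hx (by omega) (by omega) (by omega) ha hb]
  by_cases hc : a = x ∧ b = x + 2
  · rw [if_pos hc, if_pos (by omega)]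
    obtain ⟨rfl, rfl⟩ := hc
    rw [pvF, if_neg (by omega), if_pos rfl]
  · rw [if_neg hc, hval a b ha ha2 hb hb2]
    have : (b = a + 2 ∧ a < x) ↔ (b = a + 2 ∧ a < x + 1) := by omega
    rw [if_congr this rfl rfl]

theorem pvKLoop (s : List Int) (l w i : Int) (dp0 : List (List Int))
    (hw : 3 ≤ w) (hwl : w < l) (hi : 0 ≤ i) (hil : i < l - w)
    (h0 : pvIInv s l w i dp0) :
    pvIInv s l w (i + 1)
      ((PySem.List.pyRange (i + 1) (i + w) 1).foldl (fun dp k =>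
        if pvGet2 dp i (i + w) = 0 then
          pvSet2 dp i (i + w) (pvGet2 dp i k + pvGet2 dp k (i + w) + pvGet s i * pvGet s k * pvGet s (i + w))
        else
          pvSet2 dp i (i + w) (min (pvGet2 dp i (i + w)) (pvGet2 dp i k + pvGet2 dp k (i + w) + pvGet s i * pvGet s k * pvGet s (i + w)))) dp0) := by
  obtain ⟨hsh0, hval0⟩ := h0
  have hcast : ((l.toNat : Int)) = l := by omega
  -- invariant of the k-loop
  set P : Int → List (List Int) → Prop := fun k dp =>
    pvShape dp l.toNat ∧
    (∀ a b : Int, 0 ≤ a → a < l → 0 ≤ b → b < l → ¬(a = i ∧ b = i + w) →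
      pvGet2 dp a b = pvGet2 dp0 a b) ∧
    pvGet2 dp i (i + w) = (PySem.List.pyRange (i + 1) k 1).foldl (pvStep s i (i + w)) 0
    with hP
  have hmain : P (i + w) ((PySem.List.pyRange (i + 1) (i + w) 1).foldl (fun dp k =>
        if pvGet2 dp i (i + w) = 0 then
          pvSet2 dp i (i + w) (pvGet2 dp i k + pvGet2 dp k (i + w) + pvGet s i * pvGet s k * pvGet s (i + w))
        else
          pvSet2 dp i (i + w) (min (pvGet2 dp i (i + w)) (pvGet2 dp i k + pvGet2 dp k (i + w) + pvGet s i * pvGet s k * pvGet s (i + w)))) dp0) := by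
    apply pvFoldInv _ P ((i + w) - (i + 1)).toNat (i + 1) (i + w) (by omega) rfl
    · -- step
      intro x dp hx hx2 hPx
      obtain ⟨hsh, hunch, hacc⟩ := hPx
      have hgix : pvGet2 dp i x = pvF s i x := by
        rw [hunch i x hi (by omega) (by omega) (by omega) (by omega),
            hval0 i x hi (by omega) (by omega) (by omega)]
        by_cases h1 : x = i + 1
        · rw [if_neg (by omega), h1, pvF, if_pos (by omega)]
        · rw [if_pos (by omega)]
      have hgxj : pvGet2 dp x (i + w) = pvF s x (i + w) := by
        rw [hunch x (i + w) (by omega) (by omega) (by omega) (by omega) (by omega),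
            hval0 x (i + w) (by omega) (by omega) (by omega) (by omega)]
        by_cases h1 : x = i + w - 1
        · rw [if_neg (by omega), h1, pvF, if_pos (by omega)]
        · rw [if_pos (by omega)]
      have hbody : (if pvGet2 dp i (i + w) = 0 then
          pvSet2 dp i (i + w) (pvGet2 dp i x + pvGet2 dp x (i + w) + pvGet s i * pvGet s x * pvGet s (i + w))
        else
          pvSet2 dp i (i + w) (min (pvGet2 dp i (i + w)) (pvGet2 dp i x + pvGet2 dp x (i + w) + pvGet s i * pvGet s x * pvGet s (i + w)))) =
          pvSet2 dp i (i + w) (pvStep s i (i + w) (pvGet2 dp i (i + w)) x) := by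
        rw [hgix, hgxj]
        unfold pvStep
        split_ifs <;> rfl
      rw [hbody]
      refine ⟨pvShape_set2 hsh _ _ _ hi (by omega), ?_, ?_⟩
      · intro a b ha ha2 hb hb2 hne
        rw [pvGet2_set2 hsh _ _ _ _ _ hi (by omega) (by omega) (by omega) ha hb]
        rw [if_neg hne]
        exact hunch a b ha ha2 hb hb2 hne
      · rw [pvGet2_set2 hsh _ _ _ _ _ hi (by omega) (by omega) (by omega) hi (by omega)]
        rw [if_pos ⟨rfl, rfl⟩]
        rw [PySem.List.pyRange_one_succ_right (by omega), List.foldl_append, List.foldl_cons, List.foldl_nil, hacc]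
    · -- init: P (i+1) dp0
      refine ⟨hsh0, fun a b _ _ _ _ _ => rfl, ?_⟩
      rw [PySem.List.pyRange_one_eq_nil (by omega), List.foldl_nil,
          hval0 i (i + w) hi (by omega) (by omega) (by omega), if_neg (by omega)]
  -- convert the end state to pvIInv (i+1)
  obtain ⟨hsh, hunch, hfin⟩ := hmain
  refine ⟨hsh, ?_⟩
  intro a b ha ha2 hb hb2
  by_cases hc : a = i ∧ b = i + w
  · rw [hc.1, hc.2, hfin, ← pvF_eq_foldl s i (i + w) (by omega), if_pos (by omega)]
  · rw [hunch a b ha ha2 hb hb2 hc, hval0 a b ha ha2 hb hb2]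
    have : (2 ≤ b - a ∧ (b - a < w ∨ b - a = w ∧ a < i)) ↔
        (2 ≤ b - a ∧ (b - a < w ∨ b - a = w ∧ a < i + 1)) := by
      rw [not_and_or] at hc
      constructor <;> intro h <;> [exact ⟨h.1, by omega⟩; exact ⟨h.1, by omega⟩]
    rw [if_congr this rfl rfl]

theorem pvILoop (s : List Int) (l w : Int) (dp : List (List Int))
    (hw : 3 ≤ w) (hwl : w < l) (h : pvWInv s l w dp) :
    pvWInv s l (w + 1) ((PySem.List.pyRange 0 (l - w) 1).foldl (fun dp i =>
      (PySem.List.pyRange (i + 1) (i + w) 1).foldl (fun dp k =>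
        if pvGet2 dp i (i + w) = 0 then
          pvSet2 dp i (i + w) (pvGet2 dp i k + pvGet2 dp k (i + w) + pvGet s i * pvGet s k * pvGet s (i + w))
        else
          pvSet2 dp i (i + w) (min (pvGet2 dp i (i + w)) (pvGet2 dp i k + pvGet2 dp k (i + w) + pvGet s i * pvGet s k * pvGet s (i + w)))) dp) dp) := by
  have hend : pvIInv s l w (l - w) ((PySem.List.pyRange 0 (l - w) 1).foldl (fun dp i =>
      (PySem.List.pyRange (i + 1) (i + w) 1).foldl (fun dp k =>
        if pvGet2 dp i (i + w) = 0 then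
          pvSet2 dp i (i + w) (pvGet2 dp i k + pvGet2 dp k (i + w) + pvGet s i * pvGet s k * pvGet s (i + w))
        else
          pvSet2 dp i (i + w) (min (pvGet2 dp i (i + w)) (pvGet2 dp i k + pvGet2 dp k (i + w) + pvGet s i * pvGet s k * pvGet s (i + w)))) dp) dp) := by
    apply pvFoldInv _ (fun i dp => pvIInv s l w i dp) (l - w - 0).toNat 0 (l - w) (by omega) (by omega)
    · intro x dp hx hx2 hP
      exact pvKLoop s l w x dp hw hwl hx (by omega) hP
    · refine ⟨h.1, ?_⟩
      intro a b ha ha2 hb hb2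
      rw [h.2 a b ha ha2 hb hb2]
      have : (2 ≤ b - a ∧ b - a < w) ↔ (2 ≤ b - a ∧ (b - a < w ∨ b - a = w ∧ a < 0)) := by omega
      rw [if_congr this rfl rfl]
  refine ⟨hend.1, ?_⟩
  intro a b ha ha2 hb hb2
  rw [hend.2 a b ha ha2 hb hb2]
  have : (2 ≤ b - a ∧ (b - a < w ∨ b - a = w ∧ a < l - w)) ↔ (2 ≤ b - a ∧ b - a < w + 1) := by omega
  rw [if_congr this rfl rfl]

theorem pvWLoop (s : List Int) (l : Int) (dp : List (List Int))
    (hl : 4 ≤ l) (h : pvWInv s l 3 dp) :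
    pvWInv s l l ((PySem.List.pyRange 3 l 1).foldl (fun dp w =>
      (PySem.List.pyRange 0 (l - w) 1).foldl (fun dp i =>
        (PySem.List.pyRange (i + 1) (i + w) 1).foldl (fun dp k =>
          if pvGet2 dp i (i + w) = 0 then
            pvSet2 dp i (i + w) (pvGet2 dp i k + pvGet2 dp k (i + w) + pvGet s i * pvGet s k * pvGet s (i + w))
          else
            pvSet2 dp i (i + w) (min (pvGet2 dp i (i + w)) (pvGet2 dp i k + pvGet2 dp k (i + w) + pvGet s i * pvGet s k * pvGet s (i + w)))) dp) dp) dp) := by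
  apply pvFoldInv _ (fun w dp => pvWInv s l w dp) (l - 3).toNat 3 l (by omega) (by omega)
  · intro w dp hw hw2 hP
    exact pvILoop s l w dp hw hw2 hP
  · exact h

theorem pvA_eq_pvF (s : List Int) (hl : 3 ≤ (s.length : Int)) :
    min_of_multiply s = pvF s 0 ((s.length : Int) - 1) := by
  unfold min_of_multiply
  simp only [PySem.List.len_eq]
  rw [if_neg (by omega)]
  by_cases h3 : (s.length : Int) = 3
  · rw [if_pos h3, h3, pvF, if_neg (by omega), if_pos (by norm_num)]
    norm_num
  · rw [if_neg h3]
    have h0 : pvBaseInv s (s.length : Int) 0 ((PySem.List.pyRange 0 (s.length : Int) 1).map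
        (fun _ => (PySem.List.pyRange 0 (s.length : Int) 1).map (fun _ => (0 : Int)))) := by
      refine ⟨pvShape_zeros _, ?_⟩
      intro a b ha ha2 hb hb2
      rw [pvGet2_zeros _ a b ha hb, if_neg (by omega)]
    have h1 := pvFoldInv _ (fun x dp => pvBaseInv s (s.length : Int) x dp)
      ((s.length : Int) - 2 - 0).toNat 0 ((s.length : Int) - 2) (by omega) (by omega)
      (fun x dp hx hx2 hP => pvBase_step s (s.length : Int) x dp hx hx2 hP) _ h0
    have h2 : pvWInv s (s.length : Int) 3 _ := ⟨h1.1, fun a b ha ha2 hb hb2 => by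
      rw [h1.2 a b ha ha2 hb hb2]; exact if_congr (by omega) rfl rfl⟩
    have h4 := pvWLoop s (s.length : Int) _ (by omega) h2
    rw [h4.2 0 ((s.length : Int) - 1) le_rfl (by omega) (by omega) (by omega), if_pos (by omega)]

theorem pvAlt_eq (s : List Int) :
    min_of_multiply_alt s = if (s.length : Int) < 3 then -1 else pvF s 0 ((s.length : Int) - 1) := by
  unfold min_of_multiply_alt
  simp only [PySem.List.len_eq]
  by_cases h : (s.length : Int) < 3
  · rw [if_pos h, if_pos h]
  · rw [if_neg h, if_neg h]
    exact (pvBest_eq s s.length 0 ((s.length : Int) - 1) PySem.Dict.empty (by omega) (pvInv_empty s)).1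

-- ===== VERDICT (by name: the statement is the Claim_ definition above) =====
theorem min_of_multiply_spec : Claim_equal_min_of_multiply := by
  intro series _
  unfold Spec_min_of_multiply
  rw [pvAlt_eq]
  by_cases h : ((series.length : Int)) < 3
  · rw [if_pos h]
    unfold min_of_multiply
    simp only [PySem.List.len_eq]
    rw [if_pos h]
  · rw [if_neg h, pvA_eq_pvF series (by omega)]
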